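-- pv_equiv track=rewrite | github.com/larwinj/SmartCliff-Training | Strings&DataStructures/Program-27.py | find
-- ===== SOURCE A (Python) =====
-- def find(s, k):
--     freq = {}
--     order = []
--
--     for i, ch in enumerate(s):
--         if ch not in freq:
--             freq[ch] = [1, i]
--             order.append(ch)
--         else:
--             freq[ch][0] += 1
--
--     # collect non-repeating characters in order
--     non_repeats = [ch for ch in order if freq[ch][0] == 1]
--
--     if k <= len(non_repeats):
--         return non_repeats[k - 1]
--     else:
--         return "Less than k non-repeating characters in input."
-- ===== SOURCE B (Python) =====
-- def find(s, k):
--     # peel the string: repeatedly strip all occurrences of the leading character;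
--     # if exactly one copy was removed, that character is non-repeating.
--     non_repeats = []
--     t = list(s)
--     while t:
--         c = t[0]
--         rest = [x for x in t if x != c]
--         if len(t) - len(rest) == 1:
--             non_repeats.append(c)
--         t = rest
--
--     if k <= len(non_repeats):
--         return non_repeats[k - 1]
--     else:
--         return "Less than k non-repeating characters in input."
-- ===== Notes on version B (the rewrite author's own statement) =====
-- stated objective: alternative
-- what changed: B replaces A's frequency-dict + first-occurrence-order pass by a peeling loop: it repeatedly strips every occurrence of the current leading character from a shrinking list, recording the character as non-repeating exactly when one copy was removed; the k-branch is unchanged.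
-- outside the precondition, e.g. on find('ab', -2): A raises IndexError, B raises IndexError
import Mathlib
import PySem

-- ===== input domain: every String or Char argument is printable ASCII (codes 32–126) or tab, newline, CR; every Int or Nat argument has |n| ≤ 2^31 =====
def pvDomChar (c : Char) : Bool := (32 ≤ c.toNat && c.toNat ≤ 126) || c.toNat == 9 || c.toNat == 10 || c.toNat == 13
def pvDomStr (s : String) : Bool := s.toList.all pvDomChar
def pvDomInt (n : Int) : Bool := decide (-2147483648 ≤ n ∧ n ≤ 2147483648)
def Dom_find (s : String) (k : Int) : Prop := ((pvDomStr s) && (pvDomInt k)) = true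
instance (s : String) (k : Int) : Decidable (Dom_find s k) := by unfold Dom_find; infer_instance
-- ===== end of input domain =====

-- B replaces A's frequency-dict + order-list pass by a peeling loop over a shrinking
-- list (strip all copies of the leading character; unique iff exactly one removed);
-- same k-branch, so same return values.

-- ===== PORT A =====
-- the enumerate loop building freq (count, first index) and order (first occurrences)
def findLoop : List (Int × Char) → PySem.Dict Char (Int × Int) → List Char →
    PySem.Dict Char (Int × Int) × List Char
  | [], freq, order => (freq, order)
  | (i, ch) :: rest, freq, order =>
    if freq.contains ch then
      findLoop rest (freq.modify ch (0, 0) (fun p => (p.1 + 1, p.2))) order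
    else
      findLoop rest (freq.insert ch (1, i)) (order ++ [ch])

def find (s : String) (k : Int) : String :=
  let st := findLoop (PySem.List.enumerate s.toList 0) PySem.Dict.empty []
  let nonRepeats := st.2.filter (fun ch => (st.1.getD ch (0, 0)).1 == 1)
  if k ≤ (nonRepeats.length : Int) then
    match PySem.List.pyGet? nonRepeats (k - 1) with
    | some c => String.ofList [c]     -- non_repeats[k-1]
    | none => ""                  -- IndexError: excluded by Pre_find
  else "Less than k non-repeating characters in input."

-- ===== PORT B =====
-- the while loop: peel all occurrences of the leading character, keep it if unique
def bLoop (t acc : List Char) : List Char :=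
  match t with
  | [] => acc
  | c :: t' =>
    let rest := (c :: t').filter (fun x => x ≠ c)
    if (c :: t').length - rest.length == 1 then bLoop rest (acc ++ [c])
    else bLoop rest acc
termination_by t.length
decreasing_by
  all_goals
    have h : ((c :: t').filter (fun x => x ≠ c)).length ≤ t'.length := by
      rw [List.filter_cons_of_neg (by simp)]
      exact List.length_filter_le _ _
    simp only [List.length_cons]
    omega

def find_alt (s : String) (k : Int) : String :=
  let nonRepeats := bLoop s.toList []
  if k ≤ (nonRepeats.length : Int) then
    match PySem.List.pyGet? nonRepeats (k - 1) with
    | some c => String.ofList [c]     -- non_repeats[k-1]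
    | none => ""                  -- IndexError: excluded by Pre_find
  else "Less than k non-repeating characters in input."

-- ===== PRECONDITION & SPEC =====
-- A (and B) raise IndexError exactly when k ≤ -n, where n is the number of characters
-- occurring exactly once in s (then k ≤ n and the index k-1 is below -n); Pre_ excludes those.
def Pre_find (s : String) (k : Int) : Prop :=
  -(((s.toList.filter (fun ch => s.toList.count ch == 1)).length : Int)) < k
instance (s : String) (k : Int) : Decidable (Pre_find s k) := by unfold Pre_find; infer_instance

def pvWitness_find : String × Int := ("aab", 1)

def Spec_find (s : String) (k : Int) (out : String) : Prop := out = find_alt s k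
instance (s : String) (k : Int) (out : String) : Decidable (Spec_find s k out) := by
  unfold Spec_find; infer_instance

-- ===== CLAIM (what is proved, stated in full; the proofs are below) =====
def Claim_equal_find : Prop :=
  ∀ (s : String) (k : Int), Dom_find s k → Pre_find s k → Spec_find s k (find s k)

-- ===== LEMMAS AND PROOFS =====

-- proof-side model of A's order list: first occurrences of t not already in seen
def firsts (seen : List Char) : List Char → List Char
  | [] => []
  | a :: t => if a ∈ seen then firsts seen t else a :: firsts (a :: seen) t

theorem firsts_congr (s1 s2 : List Char) (t : List Char)
    (h : ∀ c, c ∈ s1 ↔ c ∈ s2) : firsts s1 t = firsts s2 t := by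
  induction t generalizing s1 s2 with
  | nil => rfl
  | cons a t ih =>
    simp only [firsts]
    by_cases ha : a ∈ s1
    · rw [if_pos ha, if_pos ((h a).1 ha)]; exact ih _ _ h
    · rw [if_neg ha, if_neg (fun hc => ha ((h a).2 hc))]
      refine congrArg _ (ih _ _ ?_)
      intro c; simp only [List.mem_cons]
      exact or_congr Iff.rfl (h c)

-- the count stored in freq is the number of occurrences of the processed characters
theorem findLoop_count (t : List (Int × Char)) (freq : PySem.Dict Char (Int × Int))
    (order : List Char) (c : Char) :
    ((findLoop t freq order).1.getD c (0, 0)).1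
      = (freq.getD c (0, 0)).1 + ((t.map (·.2)).count c : Int) := by
  induction t generalizing freq order with
  | nil => simp [findLoop]
  | cons p rest ih =>
    obtain ⟨i, ch⟩ := p
    simp only [findLoop]
    by_cases hc : freq.contains ch = true
    · rw [if_pos hc, ih]
      by_cases hceq : c = ch
      · subst hceq
        rw [PySem.Dict.getD_modify_self]
        simp
        ring
      · rw [PySem.Dict.getD_modify_of_ne _ _ _ hceq]
        simp only [List.map_cons, List.count_cons]
        rw [if_neg (fun h => hceq (eq_of_beq h).symm)]
        simp
    · rw [if_neg hc, ih]
      by_cases hceq : c = ch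
      · subst hceq
        rw [PySem.Dict.getD_insert_self,
          PySem.Dict.getD_of_not_contains _ _ (by simpa using hc)]
        simp
        ring
      · rw [PySem.Dict.getD_insert_of_ne _ _ _ hceq]
        simp only [List.map_cons, List.count_cons]
        rw [if_neg (fun h => hceq (eq_of_beq h).symm)]
        simp

-- A's order list is the first-occurrence list of the processed characters
theorem findLoop_order (t : List (Int × Char)) (freq : PySem.Dict Char (Int × Int))
    (order : List Char) :
    (findLoop t freq order).2 = order ++ firsts freq.keys (t.map (·.2)) := by
  induction t generalizing freq order with
  | nil => simp [findLoop, firsts]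
  | cons p rest ih =>
    obtain ⟨i, ch⟩ := p
    simp only [findLoop, List.map_cons, firsts]
    by_cases hc : freq.contains ch = true
    · rw [if_pos hc, ih, if_pos ((PySem.Dict.contains_iff_mem_keys _ _).1 hc)]
      refine congrArg _ (firsts_congr _ _ _ ?_)
      intro c
      rw [← PySem.Dict.contains_iff_mem_keys _ c, ← PySem.Dict.contains_iff_mem_keys _ c]
      simp [pysem, hc]
    · rw [if_neg hc, ih,
        if_neg (fun h => hc ((PySem.Dict.contains_iff_mem_keys _ _).2 h))]
      rw [PySem.Dict.keys_insert_of_not_contains _ _ (by simpa using hc)]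
      rw [firsts_congr (freq.keys ++ [ch]) (ch :: freq.keys) _ (by intro c; simp; tauto)]
      simp

-- filtering first occurrences on "occurs exactly once in l" equals filtering l itself
theorem firsts_filter (l : List Char) (t : List Char) (seen : List Char)
    (hcnt : ∀ c, t.count c ≤ l.count c)
    (hseen : ∀ c ∈ seen, c ∈ t → l.count c ≠ 1) :
    (firsts seen t).filter (fun c => l.count c == 1)
      = t.filter (fun c => l.count c == 1) := by
  induction t generalizing seen with
  | nil => rfl
  | cons a t ih =>
    have hcnt' : ∀ c, t.count c ≤ l.count c := by
      intro c
      refine le_trans ?_ (hcnt c)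
      rw [List.count_cons]
      split <;> omega
    simp only [firsts]
    by_cases ha : a ∈ seen
    · have hne : l.count a ≠ 1 := hseen a ha (List.mem_cons_self)
      rw [if_pos ha, List.filter_cons_of_neg (by simpa using hne)]
      exact ih seen hcnt' (fun c hc hct => hseen c hc (List.mem_cons_of_mem _ hct))
    · rw [if_neg ha]
      have hrec : (firsts (a :: seen) t).filter (fun c => l.count c == 1)
          = t.filter (fun c => l.count c == 1) := by
        refine ih (a :: seen) hcnt' ?_
        intro c hc hct
        rcases List.mem_cons.1 hc with heq | hc'
        · have h1 : 0 < t.count c := List.count_pos_iff.mpr hct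
          have h2 : (a :: t).count c = t.count c + 1 := by
            rw [List.count_cons, if_pos (beq_iff_eq.mpr heq.symm)]
          have h3 := hcnt c
          omega
        · exact hseen c hc' (List.mem_cons_of_mem _ hct)
      by_cases hp : l.count a = 1
      · rw [List.filter_cons_of_pos (by simpa using hp),
          List.filter_cons_of_pos (by simpa using hp), hrec]
      · rw [List.filter_cons_of_neg (by simpa using hp),
          List.filter_cons_of_neg (by simpa using hp), hrec]

-- A's non-repeating list is the "occurs exactly once" filter of the string
theorem nonRepeats_eq (s : String) :
    (findLoop (PySem.List.enumerate s.toList 0) PySem.Dict.empty []).2.filter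
        (fun ch => (((findLoop (PySem.List.enumerate s.toList 0) PySem.Dict.empty []).1.getD
          ch (0, 0)).1 == 1))
      = s.toList.filter (fun ch => s.toList.count ch == 1) := by
  have hmap : (PySem.List.enumerate s.toList 0).map (·.2) = s.toList :=
    PySem.List.map_snd_enumerate s.toList 0
  have hfilter :
      (findLoop (PySem.List.enumerate s.toList 0) PySem.Dict.empty []).2.filter
          (fun ch => (((findLoop (PySem.List.enumerate s.toList 0) PySem.Dict.empty []).1.getD
            ch (0, 0)).1 == 1))
        = (findLoop (PySem.List.enumerate s.toList 0) PySem.Dict.empty []).2.filter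
          (fun ch => s.toList.count ch == 1) := by
    refine List.filter_congr ?_
    intro c _
    rw [findLoop_count, hmap]
    have : (PySem.Dict.empty.getD c ((0 : Int), (0 : Int))).1 = 0 := rfl
    rw [this]
    simp only [zero_add]
    by_cases h : s.toList.count c = 1
    · simp [h]
    · have h1 : ((s.toList.count c : Int) == 1) = false :=
        beq_eq_false_iff_ne.mpr (by exact_mod_cast h)
      have h2 : (s.toList.count c == 1) = false := beq_eq_false_iff_ne.mpr h
      rw [h1, h2]
  rw [hfilter, findLoop_order, hmap]
  have hkeys : (PySem.Dict.empty : PySem.Dict Char (Int × Int)).keys = [] := rfl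
  rw [hkeys, List.nil_append]
  exact firsts_filter s.toList s.toList [] (fun c => le_refl _) (by simp)

-- B's peeling loop also computes the "occurs exactly once" filter
theorem count_add_filter_ne (c : Char) (t : List Char) :
    t.count c + (t.filter (fun x => x ≠ c)).length = t.length := by
  induction t with
  | nil => simp
  | cons a t ih =>
    by_cases h : a = c
    · subst h
      rw [List.filter_cons_of_neg (by simp)]
      simp only [List.count_cons, List.length_cons, beq_self_eq_true, if_pos]
      omega
    · rw [List.filter_cons_of_pos (by simpa using h)]
      simp only [List.count_cons, List.length_cons]
      rw [if_neg (by simp [h])]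
      omega

-- the filtered tail over the original equals the filter over the peeled rest
theorem peel_tail (c : Char) (t' : List Char) :
    t'.filter (fun x => (c :: t').count x == 1)
      = (t'.filter (fun x => x ≠ c)).filter
          (fun x => (t'.filter (fun y => y ≠ c)).count x == 1) := by
  rw [List.filter_filter]
  refine List.filter_congr ?_
  intro x hx
  by_cases hxc : x = c
  · have h1 : 0 < t'.count x := List.count_pos_iff.mpr hx
    have hfalse : ((c :: t').count x == 1) = false := by
      rw [List.count_cons, if_pos (by simp [hxc])]
      simp only [beq_eq_false_iff_ne]
      omega
    have hdec : (decide (x ≠ c)) = false := by simp [hxc]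
    rw [hfalse, hdec]
    simp
  · have hxc' : c ≠ x := fun e => hxc e.symm
    have hcnt : (t'.filter (fun y => y ≠ c)).count x = t'.count x :=
      List.count_filter (by simpa using hxc)
    rw [hcnt, List.count_cons, if_neg (by simpa using hxc')]
    simp [hxc]

theorem bLoop_eq (t acc : List Char) :
    bLoop t acc = acc ++ t.filter (fun x => t.count x == 1) := by
  induction t, acc using bLoop.induct with
  | case1 acc => simp [bLoop]
  | case2 acc c t' rest hcond ih =>
    have hrest : rest = (c :: t').filter (fun x => x ≠ c) := rfl
    have hstep : (c :: t').filter (fun x => x ≠ c) = t'.filter (fun x => x ≠ c) :=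
      List.filter_cons_of_neg (by simp)
    rw [hrest] at ih hcond
    have hcnt := count_add_filter_ne c (c :: t')
    have hone : (c :: t').count c = 1 := by
      simp only [beq_iff_eq] at hcond
      omega
    rw [bLoop, if_pos hcond, ih, hstep,
      List.filter_cons_of_pos (by simpa using hone), peel_tail c t']
    simp
  | case3 acc c t' rest hcond ih =>
    have hrest : rest = (c :: t').filter (fun x => x ≠ c) := rfl
    have hstep : (c :: t').filter (fun x => x ≠ c) = t'.filter (fun x => x ≠ c) :=
      List.filter_cons_of_neg (by simp)
    rw [hrest] at ih hcond
    have hcnt := count_add_filter_ne c (c :: t')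
    have hone : (c :: t').count c ≠ 1 := by
      simp only [beq_iff_eq] at hcond
      omega
    rw [bLoop, if_neg hcond, ih, hstep,
      List.filter_cons_of_neg (by simpa using hone), peel_tail c t']

-- ===== VERDICT (by name: the statement is the Claim_ definition above) =====
theorem find_spec : Claim_equal_find := by
  intro s k _ _
  unfold Spec_find find find_alt
  simp only [nonRepeats_eq s, bLoop_eq, List.nil_append]
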